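-- pv_equiv track=rewrite | github.com/Germis2021/km-route-calculator | app.py | parse_addresses
-- ===== SOURCE A (Python) =====
-- def parse_addresses(text: str) -> list:
--     lines = [l.strip() for l in text.strip().splitlines() if l.strip()]
--     if not lines:
--         return []
--     if len(lines) == 1 and "\t" in lines[0]:
--         return [a.strip() for a in lines[0].split("\t") if a.strip()]
--     addresses = []
--     for line in lines:
--         if "\t" in line:
--             addresses.extend([a.strip() for a in line.split("\t") if a.strip()])
--         else:
--             addresses.append(line)
--     return addresses
-- ===== SOURCE B (Python) =====
-- def parse_addresses(text: str) -> list: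
--     return [a.strip() for a in text.replace("\t", "\n").splitlines() if a.strip()]
-- ===== Notes on version B (the rewrite author's own statement) =====
-- stated objective: simpler
-- what changed: A's line-split with per-line tab handling and a single-line special case is replaced by one flat pass: normalise tabs to newlines, split once into lines, strip each token and drop empties in a single comprehension.
import Mathlib
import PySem

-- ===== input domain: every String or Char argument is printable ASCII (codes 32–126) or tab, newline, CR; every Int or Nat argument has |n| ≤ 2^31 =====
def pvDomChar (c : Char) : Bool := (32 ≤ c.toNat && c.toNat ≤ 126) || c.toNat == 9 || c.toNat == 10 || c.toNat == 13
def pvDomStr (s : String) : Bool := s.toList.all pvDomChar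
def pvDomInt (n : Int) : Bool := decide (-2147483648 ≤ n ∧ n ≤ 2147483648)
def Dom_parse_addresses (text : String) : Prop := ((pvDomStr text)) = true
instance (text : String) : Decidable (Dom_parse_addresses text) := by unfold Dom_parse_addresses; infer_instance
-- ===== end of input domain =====

-- B replaces A's line-split + per-line tab-handling (with its single-line special case) by one
-- flat pass: normalise tabs to newlines, split once, strip and drop empties (objective: simpler).

-- ===== PORT A =====
def parse_addresses (text : String) : List String :=
  let lines := ((PySem.Chars.splitlines (PySem.Chars.strip text.toList)).filter
      (fun l => !(PySem.Chars.strip l).isEmpty)).map PySem.Chars.strip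
  (if lines.isEmpty then []
   else if lines.length == 1 && PySem.Chars.isIn ['\t'] (lines.headD []) then
     ((PySem.Chars.splitOn (lines.headD []) ['\t']).filter
        (fun a => !(PySem.Chars.strip a).isEmpty)).map PySem.Chars.strip
   else
     lines.foldl (fun acc line =>
       if PySem.Chars.isIn ['\t'] line then
         acc ++ ((PySem.Chars.splitOn line ['\t']).filter
            (fun a => !(PySem.Chars.strip a).isEmpty)).map PySem.Chars.strip
       else acc ++ [line]) []).map (fun l => String.ofList l)

-- ===== PORT B =====
def parse_addresses_alt (text : String) : List String :=
  (((PySem.Chars.splitlines (PySem.Chars.replace text.toList ['\t'] ['\n'])).filter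
      (fun a => !(PySem.Chars.strip a).isEmpty)).map PySem.Chars.strip).map (fun l => String.ofList l)

-- ===== PRECONDITION & SPEC =====
def Spec_parse_addresses (text : String) (out : List String) : Prop := out = parse_addresses_alt text
instance (text : String) (out : List String) : Decidable (Spec_parse_addresses text out) := by unfold Spec_parse_addresses; infer_instance

-- ===== CLAIM (what is proved, stated in full; the proofs are below) =====
def Claim_equal_parse_addresses : Prop := ∀ (text : String), Dom_parse_addresses text → Spec_parse_addresses text (parse_addresses text)

-- ===== LEMMAS AND PROOFS =====

-- delimiter classes
def pvDelimT (c : Char) : Bool := c == '\t'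
def pvDelimNL (c : Char) : Bool := c == '\n' || c == '\r'
def pvDelim3 (c : Char) : Bool := pvDelimT c || pvDelimNL c

-- reference splitter: cut the text at every delimiter (cur = pending piece)
def pvSplit (d : Char → Bool) : List Char → List Char → List (List Char)
  | [], cur => [cur]
  | c :: r, cur => if d c then cur :: pvSplit d r [] else pvSplit d r (cur ++ [c])

-- strip every piece, drop the empty ones
def pvKeep (xs : List (List Char)) : List (List Char) :=
  (xs.map PySem.Chars.strip).filter (fun t => !t.isEmpty)

-- tab fields of one line
def pvG (line : List Char) : List (List Char) := pvKeep (pvSplit pvDelimT line [])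

theorem pvChar_eq_of_toNat (a b : Char) (h : a.toNat = b.toNat) : a = b := by
  apply Char.ext; apply UInt32.toBitVec_inj.mp; exact BitVec.eq_of_toNat_eq h

@[simp] theorem pvKeep_nil : pvKeep [] = [] := rfl

theorem pvKeep_append (a b : List (List Char)) : pvKeep (a ++ b) = pvKeep a ++ pvKeep b := by
  simp [pvKeep]

theorem pvKeep_cons (l : List Char) (xs : List (List Char)) :
    pvKeep (l :: xs) =
      (if (PySem.Chars.strip l).isEmpty then [] else [PySem.Chars.strip l]) ++ pvKeep xs := by
  simp only [pvKeep, List.map_cons, List.filter_cons]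
  split_ifs with h <;> simp_all

-- ---- strip facts ----
theorem pvStrip_nil : PySem.Chars.strip [] = [] := rfl

theorem pvLstrip_ws_append (ws x : List Char) (h : ∀ c ∈ ws, PySem.Chars.isspace c = true) :
    PySem.Chars.lstrip (ws ++ x) = PySem.Chars.lstrip x := by
  simp [PySem.Chars.lstrip, List.dropWhile_append, List.dropWhile_eq_nil_iff.mpr h]

theorem pvRstrip_append_ws (x ws : List Char) (h : ∀ c ∈ ws, PySem.Chars.isspace c = true) :
    PySem.Chars.rstrip (x ++ ws) = PySem.Chars.rstrip x := by
  have h' : ∀ c ∈ ws.reverse, PySem.Chars.isspace c = true := by simpa using h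
  simp [PySem.Chars.rstrip, List.dropWhile_append, List.dropWhile_eq_nil_iff.mpr h']

theorem pvStrip_ws_append (ws x : List Char) (h : ∀ c ∈ ws, PySem.Chars.isspace c = true) :
    PySem.Chars.strip (ws ++ x) = PySem.Chars.strip x := by
  simp [PySem.Chars.strip, pvLstrip_ws_append _ _ h]

theorem pvStrip_append_ws (x ws : List Char) (h : ∀ c ∈ ws, PySem.Chars.isspace c = true) :
    PySem.Chars.strip (x ++ ws) = PySem.Chars.strip x := by
  simp only [PySem.Chars.strip]
  by_cases hx : PySem.Chars.lstrip x = []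
  · have : ∀ c ∈ x, PySem.Chars.isspace c = true := by
      simpa [PySem.Chars.lstrip, List.dropWhile_eq_nil_iff] using hx
    have hall : ∀ c ∈ x ++ ws, PySem.Chars.isspace c = true := by
      intro c hc; rcases List.mem_append.mp hc with h1 | h1
      · exact this c h1
      · exact h c h1
    have : PySem.Chars.lstrip (x ++ ws) = [] := by
      simpa [PySem.Chars.lstrip, List.dropWhile_eq_nil_iff] using hall
    simp [this, hx, PySem.Chars.rstrip]
  · have : PySem.Chars.lstrip (x ++ ws) = PySem.Chars.lstrip x ++ ws := by
      simp only [PySem.Chars.lstrip] at hx ⊢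
      rw [List.dropWhile_append, if_neg (by simpa [List.isEmpty_iff] using hx)]
    rw [this, pvRstrip_append_ws _ _ h]

theorem pvLstrip_rstrip_of_lstripped (y : List Char) (hy : PySem.Chars.lstrip y = y) :
    PySem.Chars.lstrip (PySem.Chars.rstrip y) = PySem.Chars.rstrip y := by
  cases y with
  | nil => rfl
  | cons a t =>
    have ha : PySem.Chars.isspace a = false := by
      by_contra hcon
      have ha' : PySem.Chars.isspace a = true := by
        cases h' : PySem.Chars.isspace a
        · exact absurd h' hcon
        · rfl
      simp [PySem.Chars.lstrip, ha'] at hy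
      have hlen := (List.dropWhile_sublist (p := PySem.Chars.isspace) (l := t)).length_le
      rw [hy] at hlen
      simp at hlen
    simp only [PySem.Chars.rstrip, List.reverse_cons, List.dropWhile_append]
    split_ifs with h
    · simp [PySem.Chars.lstrip, List.dropWhile_cons, ha]
    · simp [PySem.Chars.lstrip, List.dropWhile_cons, ha]

theorem pvStrip_idem (x : List Char) :
    PySem.Chars.strip (PySem.Chars.strip x) = PySem.Chars.strip x := by
  have hl : PySem.Chars.lstrip (PySem.Chars.lstrip x) = PySem.Chars.lstrip x := by
    simp [PySem.Chars.lstrip, List.dropWhile_idempotent]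
  simp only [PySem.Chars.strip]
  rw [pvLstrip_rstrip_of_lstripped _ hl]
  simp [PySem.Chars.rstrip, List.dropWhile_idempotent]

-- ---- pvSplit facts ----
theorem pvSplit_no_delim (d : Char → Bool) (l : List Char) (h : ∀ c ∈ l, d c = false) :
    ∀ cur, pvSplit d l cur = [cur ++ l] := by
  induction l with
  | nil => intro cur; simp [pvSplit]
  | cons c r ih =>
    intro cur
    have hc : d c = false := h c (by simp)
    simp [pvSplit, hc, ih (fun c hc' => h c (by simp [hc']))]

theorem pvSplit_append_delim (d : Char → Bool) (c : Char) (hc : d c = true) (b : List Char) :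
    ∀ a cur, pvSplit d (a ++ c :: b) cur = pvSplit d a cur ++ pvSplit d b [] := by
  intro a
  induction a with
  | nil => intro cur; simp [pvSplit, hc]
  | cons x a ih =>
    intro cur
    by_cases hx : d x = true
    · simp [pvSplit, hx, ih]
    · simp only [Bool.not_eq_true] at hx
      simp [pvSplit, hx, ih]

theorem pvKeep_split_ws_cur (d : Char → Bool) (ws : List Char)
    (hws : ∀ c ∈ ws, PySem.Chars.isspace c = true) :
    ∀ (r : List Char) (cur : List Char),
      pvKeep (pvSplit d r (ws ++ cur)) = pvKeep (pvSplit d r cur) := by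
  intro r
  induction r with
  | nil =>
    intro cur
    simp [pvSplit, pvKeep_cons, pvStrip_ws_append _ _ hws]
  | cons c r ih =>
    intro cur
    by_cases hc : d c = true
    · simp [pvSplit, hc, pvKeep_cons, pvStrip_ws_append _ _ hws]
    · simp only [Bool.not_eq_true] at hc
      have := ih (cur ++ [c])
      simpa [pvSplit, hc, List.append_assoc] using this

theorem pvKeep_split_ws_prefix (d : Char → Bool) (ws x : List Char)
    (hws : ∀ c ∈ ws, PySem.Chars.isspace c = true) :
    pvKeep (pvSplit d (ws ++ x) []) = pvKeep (pvSplit d x []) := by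
  induction ws with
  | nil => simp
  | cons c w ih =>
    have hc : PySem.Chars.isspace c = true := hws c (by simp)
    have hw : ∀ c ∈ w, PySem.Chars.isspace c = true := fun c hc' => hws c (by simp [hc'])
    by_cases hd : d c = true
    · simp [pvSplit, hd, pvKeep_cons, pvStrip_nil, ih hw]
    · simp only [Bool.not_eq_true] at hd
      have := pvKeep_split_ws_cur d [c] (by simpa using hc) (w ++ x) []
      simp only [List.append_nil] at this
      simp [pvSplit, hd, this, ih hw]

theorem pvKeep_split_ws_only (d : Char → Bool) (ws : List Char)
    (hws : ∀ c ∈ ws, PySem.Chars.isspace c = true) :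
    ∀ cur, pvKeep (pvSplit d ws cur) = pvKeep [cur] := by
  induction ws with
  | nil => intro cur; simp [pvSplit]
  | cons c w ih =>
    intro cur
    have hc : PySem.Chars.isspace c = true := hws c (by simp)
    have hw : ∀ c ∈ w, PySem.Chars.isspace c = true := fun c hc' => hws c (by simp [hc'])
    by_cases hd : d c = true
    · have h0 := ih hw []
      simp [pvSplit, hd, pvKeep_cons, h0, pvStrip_nil]
    · simp only [Bool.not_eq_true] at hd
      have := ih hw (cur ++ [c])
      simp [pvSplit, hd, this, pvKeep_cons, pvStrip_append_ws cur [c] (by simpa using hc)]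

theorem pvKeep_split_ws_suffix (d : Char → Bool) (x ws : List Char)
    (hws : ∀ c ∈ ws, PySem.Chars.isspace c = true) :
    ∀ cur, pvKeep (pvSplit d (x ++ ws) cur) = pvKeep (pvSplit d x cur) := by
  induction x with
  | nil =>
    intro cur
    simpa [pvSplit] using pvKeep_split_ws_only d ws hws cur
  | cons c r ih =>
    intro cur
    by_cases hd : d c = true
    · simp [pvSplit, hd, pvKeep_cons, ih]
    · simp only [Bool.not_eq_true] at hd
      simp [pvSplit, hd, ih]

theorem pvKeep_split_strip (d : Char → Bool) (t : List Char) :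
    pvKeep (pvSplit d (PySem.Chars.strip t) []) = pvKeep (pvSplit d t []) := by
  have hdecomp : t = t.takeWhile PySem.Chars.isspace ++ PySem.Chars.lstrip t := by
    simp [PySem.Chars.lstrip, List.takeWhile_append_dropWhile]
  set m := PySem.Chars.lstrip t with hm
  have hws1 : ∀ c ∈ t.takeWhile PySem.Chars.isspace, PySem.Chars.isspace c = true :=
    fun c hc => List.mem_takeWhile_imp hc
  have hdec2 : m = PySem.Chars.rstrip m ++ (m.reverse.takeWhile PySem.Chars.isspace).reverse := by
    simp only [PySem.Chars.rstrip]
    rw [← List.reverse_append, List.takeWhile_append_dropWhile, List.reverse_reverse]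
  have hws2 : ∀ c ∈ (m.reverse.takeWhile PySem.Chars.isspace).reverse, PySem.Chars.isspace c = true := by
    intro c hc
    exact List.mem_takeWhile_imp (List.mem_reverse.mp hc)
  calc pvKeep (pvSplit d (PySem.Chars.strip t) [])
      = pvKeep (pvSplit d (PySem.Chars.rstrip m) []) := by rw [PySem.Chars.strip]
    _ = pvKeep (pvSplit d (PySem.Chars.rstrip m ++ (m.reverse.takeWhile PySem.Chars.isspace).reverse) []) := by
        rw [pvKeep_split_ws_suffix d _ _ hws2]
    _ = pvKeep (pvSplit d m []) := by rw [← hdec2]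
    _ = pvKeep (pvSplit d (t.takeWhile PySem.Chars.isspace ++ m) []) := by
        rw [pvKeep_split_ws_prefix d _ _ hws1]
    _ = pvKeep (pvSplit d t []) := by rw [← hdecomp]

-- ---- splitlines / splitOn / replace characterisations ----
theorem pvSplitlines_go (isB : Char → Bool) :
    ∀ (cs cur : List Char) (acc : List (List Char)),
      (∀ c ∈ cs, isB c = pvDelimNL c) →
      pvKeep (PySem.Chars.splitlines.go isB cs cur acc) =
        pvKeep acc.reverse ++ pvKeep (pvSplit pvDelimNL cs cur.reverse) := by
  intro cs cur acc
  induction cs, cur, acc using PySem.Chars.splitlines.go.induct isB with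
  | case1 cur acc hcur =>
    intro _
    have : cur = [] := by simpa [List.isEmpty_iff] using hcur
    subst this
    simp [PySem.Chars.splitlines.go, pvSplit, pvKeep_cons, pvStrip_nil]
  | case2 cur acc hcur =>
    intro _
    simp only [List.isEmpty_iff] at hcur
    simp [PySem.Chars.splitlines.go, hcur, pvSplit, pvKeep_cons, pvKeep_append]
  | case3 rest cur acc ih =>
    intro hB
    have hB' : ∀ c ∈ rest, isB c = pvDelimNL c := fun c hc => hB c (by simp [hc])
    have := ih hB'
    simp only [PySem.Chars.splitlines.go] at this ⊢
    rw [this]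
    simp [pvSplit, pvDelimNL, pvKeep_cons, pvKeep_append, pvStrip_nil]
  | case4 c rest cur acc hne hB ih =>
    intro hBall
    have hB' : ∀ c ∈ rest, isB c = pvDelimNL c := fun c hc => hBall c (by simp [hc])
    have hcNL : pvDelimNL c = true := by rw [← hBall c (by simp)]; exact hB
    have hgo : PySem.Chars.splitlines.go isB (c :: rest) cur acc =
        PySem.Chars.splitlines.go isB rest [] (cur.reverse :: acc) := by
      rw [PySem.Chars.splitlines.go]
      · simp [hB]
      · exact hne
    rw [hgo, ih hB']
    simp [pvSplit, hcNL, pvKeep_cons, pvKeep_append]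
  | case5 c rest cur acc hne hB ih =>
    intro hBall
    have hB' : ∀ c ∈ rest, isB c = pvDelimNL c := fun c hc => hBall c (by simp [hc])
    have hcNL : pvDelimNL c = false := by
      rw [← hBall c (by simp)]; simpa using hB
    have hgo : PySem.Chars.splitlines.go isB (c :: rest) cur acc =
        PySem.Chars.splitlines.go isB rest (c :: cur) acc := by
      rw [PySem.Chars.splitlines.go]
      · simp [hB]
      · exact hne
    rw [hgo, ih hB']
    simp [pvSplit, hcNL]

theorem pvSplitOn_go_tab :
    ∀ (fuel : Nat) (l cur : List Char) (acc : List (List Char)), l.length ≤ fuel →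
      PySem.Chars.splitOn.go ['\t'] fuel l cur acc =
        acc.reverse ++ pvSplit pvDelimT l cur.reverse := by
  intro fuel
  induction fuel with
  | zero =>
    intro l cur acc h
    have hl : l = [] := List.eq_nil_of_length_eq_zero (by omega)
    subst hl
    simp [PySem.Chars.splitOn.go, pvSplit]
  | succ fuel ih =>
    intro l cur acc h
    cases l with
    | nil => simp [PySem.Chars.splitOn.go, pvSplit]
    | cons c t =>
      rw [PySem.Chars.splitOn.go]
      by_cases hc : c = '\t'
      · subst hc
        have hpre : ['\t'].isPrefixOf ('\t' :: t) = true := by simp [List.isPrefixOf]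
        rw [if_pos hpre]
        have hdrop : List.drop (['\t'] : List Char).length ('\t' :: t) = t := rfl
        rw [hdrop, ih t [] (cur.reverse :: acc) (by simp at h; omega)]
        simp [pvSplit, pvDelimT]
      · have hpre : ['\t'].isPrefixOf (c :: t) = false := by
          simp [List.isPrefixOf, Ne.symm hc]
        rw [if_neg (by simp [hpre])]
        have := ih t (c :: cur) acc (by simp at h; omega)
        rw [this]
        have hcT : pvDelimT c = false := by simp [pvDelimT, hc]
        simp [pvSplit, hcT]

def pvT2N (c : Char) : Char := if c = '\t' then '\n' else c

theorem pvTab2nl_spec (t : List Char) :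
    PySem.Chars.replace t ['\t'] ['\n'] = t.map pvT2N := by
  have main : ∀ (fuel : Nat) (l acc : List Char), l.length ≤ fuel →
      PySem.Chars.replace.go ['\t'] ['\n'] fuel l acc =
        acc.reverse ++ l.map pvT2N := by
    intro fuel
    induction fuel with
    | zero =>
      intro l acc h
      have hl : l = [] := List.eq_nil_of_length_eq_zero (by omega)
      subst hl
      simp [PySem.Chars.replace.go]
    | succ fuel ih =>
      intro l acc h
      cases l with
      | nil => simp [PySem.Chars.replace.go]
      | cons c t =>
        rw [PySem.Chars.replace.go]
        by_cases hc : c = '\t'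
        · subst hc
          have hpre : ['\t'].isPrefixOf ('\t' :: t) = true := by simp [List.isPrefixOf]
          rw [if_pos hpre]
          have hdrop : List.drop (['\t'] : List Char).length ('\t' :: t) = t := rfl
          have hacc : (['\n'] : List Char).reverse ++ acc = '\n' :: acc := rfl
          rw [hdrop, hacc, ih t ('\n' :: acc) (by simp at h; omega)]
          simp [pvT2N]
        · have hpre : ['\t'].isPrefixOf (c :: t) = false := by
            simp [List.isPrefixOf, Ne.symm hc]
          rw [if_neg (by simp [hpre])]
          have := ih t (c :: acc) (by simp at h; omega)
          rw [this]
          simp [pvT2N, hc]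
  rw [PySem.Chars.replace]
  rw [if_neg (by simp)]
  simpa using main t.length t [] (le_refl _)

theorem pvSplit_map_tab (l : List Char) :
    ∀ cur, pvSplit pvDelimNL (l.map pvT2N) cur = pvSplit pvDelim3 l cur := by
  induction l with
  | nil => intro cur; simp [pvSplit]
  | cons c r ih =>
    intro cur
    by_cases hc : c = '\t'
    · subst hc
      have h1 : pvT2N '\t' = '\n' := rfl
      simp only [List.map_cons, h1, pvSplit]
      rw [if_pos (by decide), if_pos (by decide)]
      rw [ih []]
    · have h1 : pvT2N c = c := by simp [pvT2N, hc]
      by_cases hnl : pvDelimNL c = true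
      · have h3 : pvDelim3 c = true := by simp [pvDelim3, hnl]
        simp only [List.map_cons, h1, pvSplit, hnl, h3, if_true]
        rw [ih []]
      · simp only [Bool.not_eq_true] at hnl
        have h3 : pvDelim3 c = false := by simp [pvDelim3, pvDelimT, hc, hnl]
        simp only [List.map_cons, h1, pvSplit, hnl, h3, Bool.false_eq_true, if_false]
        rw [ih (cur ++ [c])]

-- ---- generic list helpers ----
theorem pvFlatMap_congr {α β : Type} (X : List α) (f g : α → List β)
    (h : ∀ x ∈ X, f x = g x) : X.flatMap f = X.flatMap g := by
  induction X with
  | nil => rfl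
  | cons x X ih =>
    simp only [List.flatMap_cons]
    rw [h x (by simp), ih (fun y hy => h y (by simp [hy]))]

theorem pvFlatMap_filter {α β : Type} (X : List α) (p : α → Bool) (g : α → List β)
    (h : ∀ x, p x = false → g x = []) : (X.filter p).flatMap g = X.flatMap g := by
  induction X with
  | nil => rfl
  | cons x X ih =>
    by_cases hp : p x = true
    · simp [List.filter_cons, hp, ih]
    · simp only [Bool.not_eq_true] at hp
      simp [List.filter_cons, hp, ih, h x hp]

theorem pvKeep_eq_filter_map (X : List (List Char)) :
    (X.filter (fun a => !(PySem.Chars.strip a).isEmpty)).map PySem.Chars.strip = pvKeep X := by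
  simp [pvKeep, List.filter_map, Function.comp_def]

theorem pvMem_keep (X : List (List Char)) (line : List Char) (h : line ∈ pvKeep X) :
    PySem.Chars.strip line = line ∧ line.isEmpty = false := by
  simp only [pvKeep, List.mem_filter, List.mem_map] at h
  obtain ⟨⟨x, _, hx⟩, hne⟩ := h
  subst hx
  exact ⟨pvStrip_idem x, by simpa using hne⟩

-- ---- A-side assembly ----
theorem pvLine_tab_pieces (line : List Char) :
    ((PySem.Chars.splitOn line ['\t']).filter
        (fun a => !(PySem.Chars.strip a).isEmpty)).map PySem.Chars.strip = pvG line := by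
  have h1 : PySem.Chars.splitOn line ['\t'] = pvSplit pvDelimT line [] := by
    rw [PySem.Chars.splitOn]
    simpa using pvSplitOn_go_tab (line.length + 1) line [] [] (by omega)
  rw [h1, pvKeep_eq_filter_map]
  rfl

theorem pvIf_line (line : List Char) (h1 : PySem.Chars.strip line = line)
    (h2 : line.isEmpty = false) :
    (if PySem.Chars.isIn ['\t'] line then pvG line else [line]) = pvG line := by
  by_cases ht : PySem.Chars.isIn ['\t'] line = true
  · simp [ht]
  · simp only [Bool.not_eq_true] at ht
    have hmem : '\t' ∉ line := by
      intro hc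
      have : ['\t'] <:+: line := (List.singleton_infix_iff _ _).mpr hc
      rw [PySem.Chars.isIn_eq_false_iff] at ht
      exact ht this
    have hnone : ∀ c ∈ line, pvDelimT c = false := by
      intro c hc
      simp only [pvDelimT, beq_eq_false_iff_ne, ne_eq]
      rintro rfl; exact hmem hc
    rw [if_neg (by simp [ht])]
    rw [pvG, pvSplit_no_delim pvDelimT line hnone, pvKeep_cons]
    simp [h1, h2]

theorem pvA_branches (lines : List (List Char))
    (hstr : ∀ line ∈ lines, PySem.Chars.strip line = line ∧ line.isEmpty = false) :
    (if lines.isEmpty then []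
     else if lines.length == 1 && PySem.Chars.isIn ['\t'] (lines.headD []) then
       ((PySem.Chars.splitOn (lines.headD []) ['\t']).filter
          (fun a => !(PySem.Chars.strip a).isEmpty)).map PySem.Chars.strip
     else
       lines.foldl (fun acc line =>
         if PySem.Chars.isIn ['\t'] line then
           acc ++ ((PySem.Chars.splitOn line ['\t']).filter
              (fun a => !(PySem.Chars.strip a).isEmpty)).map PySem.Chars.strip
         else acc ++ [line]) [])
      = lines.flatMap pvG := by
  have hfold : lines.foldl (fun acc line =>
        if PySem.Chars.isIn ['\t'] line then
          acc ++ ((PySem.Chars.splitOn line ['\t']).filter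
             (fun a => !(PySem.Chars.strip a).isEmpty)).map PySem.Chars.strip
        else acc ++ [line]) [] = lines.flatMap pvG := by
    have h1 : lines.foldl (fun acc line =>
        if PySem.Chars.isIn ['\t'] line then
          acc ++ ((PySem.Chars.splitOn line ['\t']).filter
             (fun a => !(PySem.Chars.strip a).isEmpty)).map PySem.Chars.strip
        else acc ++ [line]) [] = lines.foldl (fun acc line => acc ++ pvG line) [] := by
      apply PySem.List.foldl_congr_mem
      intro acc line hmem
      obtain ⟨hs, hn⟩ := hstr line hmem
      by_cases ht : PySem.Chars.isIn ['\t'] line = true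
      · simp [ht, pvLine_tab_pieces]
      · simp only [Bool.not_eq_true] at ht
        rw [if_neg (by simp [ht])]
        have := pvIf_line line hs hn
        rw [if_neg (by simp [ht])] at this
        rw [this]
    rw [h1, PySem.List.foldl_append_eq_flatMap]
    simp
  cases lines with
  | nil => simp
  | cons l rest =>
    simp only [List.isEmpty_cons, if_false, Bool.false_eq_true]
    by_cases hsp : ((l :: rest).length == 1 && PySem.Chars.isIn ['\t'] ((l :: rest).headD [])) = true
    · rw [if_pos hsp]
      simp only [List.length_cons, List.headD_cons, Bool.and_eq_true, beq_iff_eq] at hsp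
      obtain ⟨hlen, htab⟩ := hsp
      have hrest : rest = [] := by
        cases rest with
        | nil => rfl
        | cons a b => simp at hlen
      subst hrest
      simp only [List.headD_cons]
      rw [pvLine_tab_pieces]
      simp
    · rw [if_neg hsp]
      exact hfold

theorem pvKeep_flatMap (X : List (List Char)) :
    (pvKeep X).flatMap pvG = X.flatMap pvG := by
  rw [← pvKeep_eq_filter_map]
  rw [List.flatMap_map]
  have hstripG : ∀ a : List Char, pvG (PySem.Chars.strip a) = pvG a :=
    fun a => pvKeep_split_strip pvDelimT a
  rw [pvFlatMap_congr _ _ pvG (fun x _ => hstripG x)]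
  apply pvFlatMap_filter
  intro x hx
  simp only [Bool.not_eq_true', Bool.not_eq_false] at hx
  have hx' : PySem.Chars.strip x = [] := by simpa [List.isEmpty_iff] using hx
  rw [← hstripG x, hx']
  rfl

theorem pvSplit_d3_eq_dT (x : List Char) (hx : ∀ c ∈ x, pvDelimNL c = false) :
    ∀ z, pvSplit pvDelim3 x z = pvSplit pvDelimT x z := by
  induction x with
  | nil => intro z; rfl
  | cons c r ih =>
    intro z
    have hc : pvDelimNL c = false := hx c (by simp)
    have h3 : pvDelim3 c = pvDelimT c := by simp [pvDelim3, hc]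
    have ih' := ih (fun c hc' => hx c (by simp [hc']))
    by_cases ht : pvDelimT c = true
    · simp [pvSplit, h3, ht, ih']
    · simp only [Bool.not_eq_true] at ht
      simp [pvSplit, h3, ht, ih']

theorem pvSplit_flatMap (cs : List Char) :
    ∀ cur, (∀ c ∈ cur, pvDelimNL c = false) →
      (pvSplit pvDelimNL cs cur).flatMap pvG = pvKeep (pvSplit pvDelim3 (cur ++ cs) []) := by
  induction cs with
  | nil =>
    intro cur hcur
    simp only [pvSplit, List.flatMap_cons, List.flatMap_nil, List.append_nil]
    rw [pvSplit_d3_eq_dT cur hcur]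
    simp [pvG]
  | cons c r ih =>
    intro cur hcur
    by_cases hc : pvDelimNL c = true
    · have h3 : pvDelim3 c = true := by simp [pvDelim3, hc]
      rw [show cur ++ c :: r = cur ++ c :: r from rfl]
      rw [pvSplit_append_delim pvDelim3 c h3 r cur []]
      rw [pvKeep_append]
      simp only [pvSplit, hc, if_true, List.flatMap_cons]
      rw [ih [] (by simp)]
      rw [pvSplit_d3_eq_dT cur hcur]
      simp [pvG]
    · simp only [Bool.not_eq_true] at hc
      simp only [pvSplit, hc, Bool.false_eq_true, if_false]
      have hcur' : ∀ x ∈ cur ++ [c], pvDelimNL x = false := by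
        intro x hx
        rcases List.mem_append.mp hx with h | h
        · exact hcur x h
        · simp only [List.mem_singleton] at h; subst h; exact hc
      rw [ih (cur ++ [c]) hcur']
      simp

-- ---- domain bridge for splitlines' break test ----
theorem pvIsB_dom (c : Char) (h : pvDomChar c = true) :
    (decide (c.toNat = 10) || decide (c.toNat = 13) || decide (c.toNat = 11) ||
     decide (c.toNat = 12) || decide (c.toNat = 28) || decide (c.toNat = 29) ||
     decide (c.toNat = 30) || decide (c.toNat = 133) || decide (c.toNat = 8232) ||
     decide (c.toNat = 8233)) = pvDelimNL c := by
  simp only [pvDomChar, Bool.or_eq_true, Bool.and_eq_true, decide_eq_true_eq, beq_iff_eq] at h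
  by_cases h10 : c.toNat = 10
  · have : c = '\n' := pvChar_eq_of_toNat c '\n' (by rw [h10]; rfl)
    subst this; decide
  · by_cases h13 : c.toNat = 13
    · have : c = '\r' := pvChar_eq_of_toNat c '\r' (by rw [h13]; rfl)
      subst this; decide
    · have hbig : c.toNat ≠ 11 ∧ c.toNat ≠ 12 ∧ c.toNat ≠ 28 ∧ c.toNat ≠ 29 ∧
          c.toNat ≠ 30 ∧ c.toNat ≠ 133 ∧ c.toNat ≠ 8232 ∧ c.toNat ≠ 8233 := by
        rcases h with ((⟨h1, h2⟩ | h9) | ha) | hb <;> omega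
      obtain ⟨a1, a2, a3, a4, a5, a6, a7, a8⟩ := hbig
      have hn : (c == '\n') = false := by
        simp only [beq_eq_false_iff_ne, ne_eq]
        rintro rfl; exact h10 rfl
      have hr : (c == '\r') = false := by
        simp only [beq_eq_false_iff_ne, ne_eq]
        rintro rfl; exact h13 rfl
      simp [pvDelimNL, h10, h13, a1, a2, a3, a4, a5, a6, a7, a8, hn, hr]

theorem pvMem_strip (t : List Char) (c : Char) (h : c ∈ PySem.Chars.strip t) : c ∈ t := by
  simp only [PySem.Chars.strip, PySem.Chars.rstrip, PySem.Chars.lstrip] at h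
  rw [List.mem_reverse] at h
  have h1 := (List.dropWhile_sublist (p := PySem.Chars.isspace)
      (l := (List.dropWhile PySem.Chars.isspace t).reverse)).subset h
  rw [List.mem_reverse] at h1
  exact (List.dropWhile_sublist _).subset h1

theorem pvSplitlines_keep (cs : List Char) (h : ∀ c ∈ cs, pvDomChar c = true) :
    pvKeep (PySem.Chars.splitlines cs) = pvKeep (pvSplit pvDelimNL cs []) := by
  rw [PySem.Chars.splitlines]
  rw [pvSplitlines_go _ cs [] []
    (by intro c hc; exact pvIsB_dom c (h c hc))]
  simp

-- ---- the two cores agree ----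
theorem pvCore_eq (t : List Char) (h : ∀ c ∈ t, pvDomChar c = true) :
    (if (((PySem.Chars.splitlines (PySem.Chars.strip t)).filter
          (fun l => !(PySem.Chars.strip l).isEmpty)).map PySem.Chars.strip).isEmpty then []
     else if (((PySem.Chars.splitlines (PySem.Chars.strip t)).filter
          (fun l => !(PySem.Chars.strip l).isEmpty)).map PySem.Chars.strip).length == 1 &&
        PySem.Chars.isIn ['\t'] ((((PySem.Chars.splitlines (PySem.Chars.strip t)).filter
          (fun l => !(PySem.Chars.strip l).isEmpty)).map PySem.Chars.strip).headD []) then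
       ((PySem.Chars.splitOn ((((PySem.Chars.splitlines (PySem.Chars.strip t)).filter
            (fun l => !(PySem.Chars.strip l).isEmpty)).map PySem.Chars.strip).headD []) ['\t']).filter
          (fun a => !(PySem.Chars.strip a).isEmpty)).map PySem.Chars.strip
     else
       ((((PySem.Chars.splitlines (PySem.Chars.strip t)).filter
          (fun l => !(PySem.Chars.strip l).isEmpty)).map PySem.Chars.strip).foldl (fun acc line =>
         if PySem.Chars.isIn ['\t'] line then
           acc ++ ((PySem.Chars.splitOn line ['\t']).filter
              (fun a => !(PySem.Chars.strip a).isEmpty)).map PySem.Chars.strip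
         else acc ++ [line]) []))
    = ((PySem.Chars.splitlines (PySem.Chars.replace t ['\t'] ['\n'])).filter
        (fun a => !(PySem.Chars.strip a).isEmpty)).map PySem.Chars.strip := by
  have hstripDom : ∀ c ∈ PySem.Chars.strip t, pvDomChar c = true :=
    fun c hc => h c (pvMem_strip t c hc)
  -- A side
  rw [pvKeep_eq_filter_map (PySem.Chars.splitlines (PySem.Chars.strip t))]
  rw [pvA_branches _ (fun line hline => pvMem_keep _ line hline)]
  rw [pvSplitlines_keep (PySem.Chars.strip t) hstripDom]
  rw [pvKeep_flatMap]
  rw [pvSplit_flatMap (PySem.Chars.strip t) [] (by simp)]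
  simp only [List.nil_append]
  rw [pvKeep_split_strip pvDelim3 t]
  -- B side
  rw [pvKeep_eq_filter_map (PySem.Chars.splitlines (PySem.Chars.replace t ['\t'] ['\n']))]
  rw [pvTab2nl_spec t]
  have hmapDom : ∀ c ∈ t.map pvT2N, pvDomChar c = true := by
    intro c hc
    simp only [List.mem_map] at hc
    obtain ⟨x, hx, hfx⟩ := hc
    by_cases hxt : x = '\t'
    · subst hxt
      rw [show pvT2N '\t' = '\n' from rfl] at hfx
      subst hfx; decide
    · rw [show pvT2N x = x from by simp [pvT2N, hxt]] at hfx
      subst hfx; exact h _ hx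
  rw [pvSplitlines_keep _ hmapDom]
  rw [pvSplit_map_tab t []]

-- ===== VERDICT (by name: the statement is the Claim_ definition above) =====
theorem parse_addresses_spec : Claim_equal_parse_addresses := by
  intro text hdom
  unfold Spec_parse_addresses parse_addresses parse_addresses_alt
  have h : ∀ c ∈ text.toList, pvDomChar c = true := by
    have := hdom
    unfold Dom_parse_addresses pvDomStr at this
    exact fun c hc => List.all_eq_true.mp this c hc
  exact congrArg (List.map (fun l => String.ofList l)) (pvCore_eq text.toList h)
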